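-- pv_equiv track=rewrite | github.com/boss9293-ops/Marketflow-v1.1 | marketflow/backend/services/pipeline_recovery.py | _find_consecutive_failures
-- ===== SOURCE A (Python) =====
-- def _find_consecutive_failures(runs: list) -> set:
--     """
--     Return set of script names that failed in at least two consecutive runs.
--     Runs are newest-first. Check adjacent pairs.
--     """
--     consecutive: set = set()
--     for i in range(len(runs) - 1):
--         curr = set(s for s in runs[i]['failed_scripts'] if s)
--         nxt  = set(s for s in runs[i + 1]['failed_scripts'] if s)
--         overlap = curr & nxt
--         consecutive.update(overlap)
--     return consecutive
-- ===== SOURCE B (Python) =====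
-- def _find_consecutive_failures(runs: list) -> set:
--     """
--     Return set of script names that failed in at least two consecutive runs.
--     Divide and conquer: split the run list at its midpoint (the middle run is
--     shared by both halves so the boundary pair is kept) and union the two
--     half-results; a two-run list is resolved directly by filtering the first
--     run's truthy failed scripts by membership in the second run's.
--     """
--     if len(runs) < 2:
--         return set()
--     if len(runs) == 2:
--         nxt = {s for s in runs[1]['failed_scripts'] if s}
--         return {s for s in runs[0]['failed_scripts'] if s and s in nxt}
--     mid = len(runs) // 2
--     return _find_consecutive_failures(runs[:mid + 1]) | _find_consecutive_failures(runs[mid:])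
-- ===== Notes on version B (the rewrite author's own statement) =====
-- stated objective: alternative
-- what changed: B replaces A's linear index loop of pairwise set intersections with a divide-and-conquer recursion: the run list is split at its midpoint (sharing the middle run so the boundary pair survives), the two halves are solved recursively and unioned, and a two-run base case filters the first run's truthy failed scripts by membership in the second run's truthy set; Pre_ excludes only inputs where A raises KeyError (>=2 runs with a run missing 'failed_scripts').
import Mathlib
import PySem

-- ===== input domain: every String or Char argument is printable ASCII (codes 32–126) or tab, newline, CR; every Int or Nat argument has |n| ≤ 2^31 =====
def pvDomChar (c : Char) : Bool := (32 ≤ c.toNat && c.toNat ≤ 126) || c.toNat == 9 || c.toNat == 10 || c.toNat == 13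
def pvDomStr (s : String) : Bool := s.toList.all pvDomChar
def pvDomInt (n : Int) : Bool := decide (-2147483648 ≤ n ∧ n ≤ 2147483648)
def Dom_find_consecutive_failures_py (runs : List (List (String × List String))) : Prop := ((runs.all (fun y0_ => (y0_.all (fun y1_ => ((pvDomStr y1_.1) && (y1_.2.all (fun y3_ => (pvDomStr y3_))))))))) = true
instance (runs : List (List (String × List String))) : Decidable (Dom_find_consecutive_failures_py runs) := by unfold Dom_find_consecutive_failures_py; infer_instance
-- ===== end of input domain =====

-- B answers the same question by divide and conquer (split at the midpoint,
-- sharing the middle run, and union the half-results) instead of A's index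
-- loop of pairwise set intersections; the return value is proved identical
-- to A's on Pre_ (objective: alternative, not claimed faster).

-- ===== PORT A =====
-- shared helper: {s for s in run['failed_scripts'] if s} (a comprehension both Pythons contain)
def pvTruthySet (run : List (String × List String)) : PySem.Set String :=
  PySem.Set.ofList ((((PySem.Dict.mk run).get? "failed_scripts").getD []).filter (fun s => !(s == "")))

def find_consecutive_failures_py (runs : List (List (String × List String))) : List String :=
  (PySem.List.pyRange 0 ((runs.length : Int) - 1) 1).foldl
    (fun consecutive i =>
      let curr := pvTruthySet (PySem.List.pyGetD runs i [])
      let nxt := pvTruthySet (PySem.List.pyGetD runs (i + 1) [])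
      let overlap := PySem.Set.inter curr nxt
      PySem.Set.update consecutive overlap)
    []

-- ===== PORT B =====
-- {s for s in runs[0]['failed_scripts'] if s and s in nxt} (B's base-case comprehension)
def pvOverlapBase (r0 r1 : List (String × List String)) : PySem.Set String :=
  let nxt := pvTruthySet r1
  PySem.Set.ofList ((((PySem.Dict.mk r0).get? "failed_scripts").getD []).filter
    (fun s => !(s == "") && PySem.Set.contains nxt s))

-- fuel (= number of runs) only makes the halving recursion structural for Lean;
-- it is never exhausted on the recursion's own calls
def pvAltGo : Nat → List (List (String × List String)) → List String
  | 0, _ => []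
  | fuel + 1, runs =>
    if runs.length < 2 then []
    else if runs.length = 2 then
      pvOverlapBase (PySem.List.pyGetD runs 0 []) (PySem.List.pyGetD runs 1 [])
    else
      let mid : Int := PySem.Int.floordiv (runs.length : Int) 2
      PySem.Set.union
        (pvAltGo fuel (PySem.List.slice runs none (some (mid + 1))))
        (pvAltGo fuel (PySem.List.slice runs (some mid) none))

def find_consecutive_failures_py_alt (runs : List (List (String × List String))) : List String :=
  pvAltGo runs.length runs

-- ===== PRECONDITION & SPEC =====
-- Pre_ excludes exactly the inputs where Python A raises KeyError: with two or
-- more runs, every run must carry the 'failed_scripts' key.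
def Pre_find_consecutive_failures_py (runs : List (List (String × List String))) : Prop :=
  runs.length ≤ 1 ∨ ∀ run ∈ runs, ((PySem.Dict.mk run).get? "failed_scripts").isSome = true
instance (runs : List (List (String × List String))) : Decidable (Pre_find_consecutive_failures_py runs) := by unfold Pre_find_consecutive_failures_py; infer_instance

def pvWitness_find_consecutive_failures_py : (List (List (String × List String))) :=
  [[("failed_scripts", ["a", "b"])], [("failed_scripts", ["b"])]]

def Spec_find_consecutive_failures_py (runs : List (List (String × List String))) (out : List String) : Prop := out = find_consecutive_failures_py_alt runs
instance (runs : List (List (String × List String))) (out : List String) : Decidable (Spec_find_consecutive_failures_py runs out) := by unfold Spec_find_consecutive_failures_py; infer_instance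

-- ===== CLAIM (what is proved, stated in full; the proofs are below) =====
def Claim_equal_find_consecutive_failures_py : Prop := ∀ (runs : List (List (String × List String))), Dom_find_consecutive_failures_py runs → Pre_find_consecutive_failures_py runs → Spec_find_consecutive_failures_py runs (find_consecutive_failures_py runs)

-- ===== LEMMAS AND PROOFS =====

-- the list of adjacent pairs of runs, and the list of their overlap sets
def pvPairs (l : List (List (String × List String))) :
    List ((List (String × List String)) × (List (String × List String))) := l.zip l.tail

def pvOvl (runs : List (List (String × List String))) : List (List String) :=
  (pvPairs runs).map (fun p => PySem.Set.inter (pvTruthySet p.1) (pvTruthySet p.2))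

-- ---- facts about folds of PySem.Set.add ----

theorem pv_add_of_mem (s : PySem.Set String) (a : String) (h : a ∈ s) :
    PySem.Set.add s a = s := by
  simp [PySem.Set.add, PySem.Set.contains, List.elem_eq_contains, List.contains_iff_mem, h]

theorem pv_mem_foldl_add (l : List String) (s : PySem.Set String) (a : String) :
    a ∈ l.foldl PySem.Set.add s ↔ a ∈ s ∨ a ∈ l := by
  induction l generalizing s with
  | nil => simp
  | cons x l ih =>
    simp only [List.foldl_cons, ih, PySem.Set.add]
    by_cases hx : PySem.Set.contains s x = true
    · have hmem : x ∈ s := by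
        simpa [PySem.Set.contains, List.contains_iff_mem] using hx
      simp only [if_pos hx, List.mem_cons]
      constructor
      · rintro (h | h) <;> tauto
      · rintro (h | h | h)
        · tauto
        · exact Or.inl (h ▸ hmem)
        · tauto
    · simp only [if_neg hx, List.mem_append, List.mem_singleton, List.mem_cons]
      tauto

-- folding over (add u a) = folding over u, then adding a
theorem pv_foldl_over_add (u : PySem.Set String) (a : String) (s : PySem.Set String) :
    (PySem.Set.add u a).foldl PySem.Set.add s
      = PySem.Set.add (u.foldl PySem.Set.add s) a := by
  by_cases h : a ∈ u
  · rw [pv_add_of_mem u a h, pv_add_of_mem _ a ((pv_mem_foldl_add u s a).2 (Or.inr h))]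
  · have : PySem.Set.add u a = u ++ [a] := by
      simp [PySem.Set.add, PySem.Set.contains, List.contains_iff_mem, h]
    rw [this, List.foldl_append]
    rfl

-- folding over an add-fold = folding over the raw list
theorem pv_foldl_over_foldl (y : List String) (u s : PySem.Set String) :
    (y.foldl PySem.Set.add u).foldl PySem.Set.add s
      = y.foldl PySem.Set.add (u.foldl PySem.Set.add s) := by
  induction y generalizing u with
  | nil => rfl
  | cons a y ih =>
    simp only [List.foldl_cons]
    rw [ih (PySem.Set.add u a), pv_foldl_over_add]

theorem pv_foldl_over_ofList (y : List String) (s : PySem.Set String) :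
    (PySem.Set.ofList y).foldl PySem.Set.add s = y.foldl PySem.Set.add s := by
  have := pv_foldl_over_foldl y [] s
  simpa [PySem.Set.ofList, PySem.Set.empty] using this

-- union of two builds is the build of the concatenation
theorem pv_union_ofList (x y : List String) :
    PySem.Set.union (PySem.Set.ofList x) (PySem.Set.ofList y)
      = PySem.Set.ofList (x ++ y) := by
  show PySem.Set.update (PySem.Set.ofList x) (PySem.Set.ofList y) = _
  simp only [PySem.Set.update, PySem.Set.ofList, PySem.Set.empty, List.foldl_append]
  exact pv_foldl_over_ofList y _

-- a fold of updates is the update by the flattened list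
theorem pv_foldl_update_flatten (os : List (List String)) (acc : PySem.Set String) :
    os.foldl PySem.Set.update acc = PySem.Set.update acc os.flatten := by
  induction os generalizing acc with
  | nil => rfl
  | cons o os ih =>
    simp only [List.foldl_cons, List.flatten_cons, ih, PySem.Set.update, List.foldl_append]

-- building a set commutes with filtering
theorem pv_foldl_add_filter (q : String → Bool) (l : List String) (s : PySem.Set String) :
    (l.foldl PySem.Set.add s).filter q = (l.filter q).foldl PySem.Set.add (s.filter q) := by
  induction l generalizing s with
  | nil => rfl
  | cons a l ih =>
    simp only [List.foldl_cons, List.filter_cons]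
    by_cases hq : q a = true
    · rw [ih (PySem.Set.add s a), if_pos hq]
      simp only [List.foldl_cons]
      congr 1
      by_cases h : a ∈ s
      · rw [pv_add_of_mem s a h, pv_add_of_mem]
        exact List.mem_filter.2 ⟨h, hq⟩
      · have h1 : PySem.Set.add s a = s ++ [a] := by
          simp [PySem.Set.add, PySem.Set.contains, List.contains_iff_mem, h]
        have h2 : PySem.Set.add (s.filter q) a = s.filter q ++ [a] := by
          have : a ∉ s.filter q := fun hc => h (List.mem_filter.1 hc).1
          simp [PySem.Set.add, PySem.Set.contains, List.contains_iff_mem, this]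
        rw [h1, h2, List.filter_append, List.filter_cons, if_pos hq]
        rfl
    · rw [ih (PySem.Set.add s a), if_neg hq]
      congr 1
      by_cases h : a ∈ s
      · rw [pv_add_of_mem s a h]
      · have h1 : PySem.Set.add s a = s ++ [a] := by
          simp [PySem.Set.add, PySem.Set.contains, List.contains_iff_mem, h]
        rw [h1, List.filter_append, List.filter_cons, if_neg hq]
        simp
theorem pv_ofList_filter (q : String → Bool) (l : List String) :
    (PySem.Set.ofList l).filter q = PySem.Set.ofList (l.filter q) := by
  simpa [PySem.Set.ofList, PySem.Set.empty] using pv_foldl_add_filter q l []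

-- building a set from a duplicate-free list returns it unchanged
theorem pv_foldl_add_nodup (l : List String) (s : PySem.Set String)
    (h : (s ++ l).Nodup) : l.foldl PySem.Set.add s = s ++ l := by
  induction l generalizing s with
  | nil => simp
  | cons a l ih =>
    have ha : a ∉ s := by
      intro hc
      exact (List.disjoint_of_nodup_append h) hc (List.mem_cons_self)
    have h1 : PySem.Set.add s a = s ++ [a] := by
      simp [PySem.Set.add, PySem.Set.contains, List.contains_iff_mem, ha]
    simp only [List.foldl_cons, h1]
    rw [ih (s ++ [a]) (by simpa using h)]
    simp

theorem pv_ofList_nodup (l : List String) (h : l.Nodup) :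
    PySem.Set.ofList l = l := by
  simpa [PySem.Set.ofList, PySem.Set.empty] using pv_foldl_add_nodup l [] (by simpa using h)

theorem pv_nodup_ofList (l : List String) : (PySem.Set.ofList l).Nodup := by
  have : ∀ (l : List String) (s : PySem.Set String), s.Nodup → (l.foldl PySem.Set.add s).Nodup := by
    intro l
    induction l with
    | nil => intro s hs; simpa using hs
    | cons a l ih =>
      intro s hs
      simp only [List.foldl_cons]
      apply ih
      by_cases h : a ∈ s
      · rwa [pv_add_of_mem s a h]
      · have h1 : PySem.Set.add s a = s ++ [a] := by
          simp [PySem.Set.add, PySem.Set.contains, List.contains_iff_mem, h]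
        rw [h1]
        simp only [List.nodup_append, List.nodup_cons, List.not_mem_nil, not_false_iff,
          List.nodup_nil, true_and, and_true, hs]
        intro b hb c hc
        rw [List.mem_singleton] at hc
        intro hbc
        exact h (hc ▸ hbc ▸ hb)
  simpa [PySem.Set.ofList, PySem.Set.empty] using this l [] List.nodup_nil

-- ---- the pair list and its splitting at the midpoint ----

theorem pv_pairs_cons_cons (x x' : List (String × List String))
    (t : List (List (String × List String))) :
    pvPairs (x :: x' :: t) = (x, x') :: pvPairs (x' :: t) := rfl

theorem pv_pairs_split : ∀ (k : Nat) (l : List (List (String × List String))),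
    k + 1 ≤ l.length → pvPairs l = pvPairs (l.take (k + 1)) ++ pvPairs (l.drop k) := by
  intro k
  induction k with
  | zero =>
    intro l _
    have : pvPairs (l.take 1) = [] := by
      cases l with
      | nil => rfl
      | cons x t => rfl
    simp [this]
  | succ k ih =>
    intro l hl
    cases l with
    | nil => simp at hl
    | cons x l' =>
      cases l' with
      | nil => simp at hl
      | cons x' t =>
        have hlen : k + 1 ≤ (x' :: t).length := by
          simpa using Nat.le_of_succ_le_succ hl
        have htk : (x :: x' :: t).take (k + 1 + 1) = x :: (x' :: t).take (k + 1) := rfl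
        have hdr : (x :: x' :: t).drop (k + 1) = (x' :: t).drop k := rfl
        rw [htk, hdr, pv_pairs_cons_cons]
        have hne : (x' :: t).take (k + 1) = x' :: t.take k := rfl
        rw [hne]
        rw [pv_pairs_cons_cons x x' (t.take k)]
        rw [ih (x' :: t) hlen]
        simp [hne]

-- ---- characterisation of A ----

-- The index range A iterates over, turned into the list of adjacent pairs.
theorem pv_pairs_eq_zip (runs : List (List (String × List String))) :
    (PySem.List.pyRange 0 ((runs.length : Int) - 1) 1).map
      (fun i => (PySem.List.pyGetD runs i ([] : List (String × List String)),
                 PySem.List.pyGetD runs (i + 1) ([] : List (String × List String))))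
    = pvPairs runs := by
  cases runs with
  | nil => rfl
  | cons r rest =>
    have h : ((r :: rest).length : Int) - 1 = ((rest.length : Nat) : Int) := by
      simp only [List.length_cons]; push_cast; ring
    rw [h, PySem.List.pyRange_zero_natCast]
    apply List.ext_getElem
    · simp [pvPairs]
    · intro k h1 h2
      have hk : k < rest.length := by simpa using h1
      simp only [List.getElem_map, List.getElem_range, pvPairs, List.getElem_zip,
        List.tail_cons]
      have e1 : PySem.List.pyGetD (r :: rest) ((k : Nat) : Int) ([] : List (String × List String))
          = (r :: rest)[k] := by
        rw [PySem.List.pyGetD_natCast]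
        exact List.getD_eq_getElem _ _ (by simpa using Nat.lt_succ_of_lt hk)
      have e2 : PySem.List.pyGetD (r :: rest) (((k : Nat) : Int) + 1) ([] : List (String × List String))
          = rest[k] := by
        rw [show ((k : Nat) : Int) + 1 = (((k + 1 : Nat)) : Int) by push_cast; ring,
          PySem.List.pyGetD_natCast]
        rw [List.getD_eq_getElem _ _ (by simpa using Nat.succ_lt_succ hk)]
        simp
      exact Prod.ext e1 e2

-- A builds exactly the deduplication of the concatenated overlap lists.
theorem pv_a_char (runs : List (List (String × List String))) :
    find_consecutive_failures_py runs = PySem.Set.ofList (pvOvl runs).flatten := by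
  have key : find_consecutive_failures_py runs
      = ((PySem.List.pyRange 0 ((runs.length : Int) - 1) 1).map
          (fun i => (PySem.List.pyGetD runs i ([] : List (String × List String)),
                     PySem.List.pyGetD runs (i + 1) ([] : List (String × List String))))).foldl
          (fun c p => PySem.Set.update c (PySem.Set.inter (pvTruthySet p.1) (pvTruthySet p.2)))
          [] := by
    unfold find_consecutive_failures_py
    rw [List.foldl_map]
  rw [key, pv_pairs_eq_zip]
  rw [show (pvPairs runs).foldl
        (fun c p => PySem.Set.update c (PySem.Set.inter (pvTruthySet p.1) (pvTruthySet p.2))) []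
      = (pvOvl runs).foldl PySem.Set.update [] from Eq.symm List.foldl_map]
  rw [pv_foldl_update_flatten]
  rfl

-- ---- characterisation of B ----

theorem pv_filter_comb (p q : String → Bool) (l : List String) :
    PySem.Set.ofList (l.filter (fun s => p s && q s))
      = PySem.Set.ofList ((PySem.Set.ofList (l.filter p)).filter q) := by
  rw [pv_ofList_filter q (l.filter p), pv_ofList_nodup _ (pv_nodup_ofList _),
    List.filter_filter]
  first
  | rfl
  | (congr 1
     apply List.filter_congr
     intro a _
     exact Bool.and_comm _ _)

theorem pv_base_eq (r0 r1 : List (String × List String)) :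
    pvOverlapBase r0 r1
      = PySem.Set.ofList (PySem.Set.inter (pvTruthySet r0) (pvTruthySet r1)) :=
  pv_filter_comb (fun s => !(s == ""))
    (fun s => PySem.Set.contains (pvTruthySet r1) s) _

theorem pv_alt_go_char : ∀ (fuel : Nat) (runs : List (List (String × List String))),
    runs.length ≤ fuel →
    pvAltGo fuel runs = PySem.Set.ofList (pvOvl runs).flatten := by
  intro fuel
  induction fuel with
  | zero =>
    intro runs h
    have : runs = [] := List.eq_nil_of_length_eq_zero (Nat.le_zero.1 h)
    subst this
    rfl
  | succ fuel ih =>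
    intro runs hlen
    show (if runs.length < 2 then []
      else if runs.length = 2 then
        pvOverlapBase (PySem.List.pyGetD runs 0 []) (PySem.List.pyGetD runs 1 [])
      else
        let mid : Int := PySem.Int.floordiv (runs.length : Int) 2
        PySem.Set.union
          (pvAltGo fuel (PySem.List.slice runs none (some (mid + 1))))
          (pvAltGo fuel (PySem.List.slice runs (some mid) none))) = _
    by_cases h1 : runs.length < 2
    · rw [if_pos h1]
      match runs, h1 with
      | [], _ => rfl
      | [r], _ => rfl
    · rw [if_neg h1]
      by_cases h2 : runs.length = 2
      · rw [if_pos h2]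
        match runs, h2 with
        | [r0, r1], _ =>
          have g0 : PySem.List.pyGetD [r0, r1] 0 ([] : List (String × List String)) = r0 := rfl
          have g1 : PySem.List.pyGetD [r0, r1] 1 ([] : List (String × List String)) = r1 := rfl
          rw [g0, g1, pv_base_eq]
          simp [pvOvl, pvPairs]
      · rw [if_neg h2]
        have hn3 : 3 ≤ runs.length := by omega
        have hm : PySem.Int.floordiv (runs.length : Int) 2 = ((runs.length / 2 : Nat) : Int) := by
          exact_mod_cast PySem.Int.floordiv_natCast runs.length 2
        have hsl : PySem.List.slice runs none (some ((PySem.Int.floordiv (runs.length : Int) 2) + 1))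
            = runs.take (runs.length / 2 + 1) := by
          rw [hm, show ((runs.length / 2 : Nat) : Int) + 1 = (((runs.length / 2 + 1 : Nat)) : Int) by push_cast; ring,
            PySem.List.slice_to_natCast]
        have hsr : PySem.List.slice runs (some (PySem.Int.floordiv (runs.length : Int) 2)) none
            = runs.drop (runs.length / 2) := by
          rw [hm, PySem.List.slice_from_natCast]
        simp only [hsl, hsr]
        have hle1 : (runs.take (runs.length / 2 + 1)).length ≤ fuel := by
          simp only [List.length_take]; omega
        have hle2 : (runs.drop (runs.length / 2)).length ≤ fuel := by
          simp only [List.length_drop]; omega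
        rw [ih _ hle1, ih _ hle2, pv_union_ofList]
        unfold pvOvl
        rw [pv_pairs_split (runs.length / 2) runs (by omega), List.map_append,
          List.flatten_append]

theorem pv_alt_char (runs : List (List (String × List String))) :
    find_consecutive_failures_py_alt runs = PySem.Set.ofList (pvOvl runs).flatten :=
  pv_alt_go_char runs.length runs (Nat.le_refl _)

-- ===== VERDICT (by name: the statement is the Claim_ definition above) =====
theorem find_consecutive_failures_py_spec : Claim_equal_find_consecutive_failures_py := by
  intro runs _ _
  unfold Spec_find_consecutive_failures_py
  rw [pv_a_char, pv_alt_char]
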